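-- pv_equiv track=rewrite | github.com/gsethupathy5/AI_For_CS | python/2284.sender-with-largest-word-count/solution.py | largestWordCount
-- ===== SOURCE A (Python) =====
-- from typing import List
--
-- def largestWordCount(messages: List[str], senders: List[str]) -> str:
--     sender_word_count = {}
--     for i in range(len(messages)):
--         sender = senders[i]
--         words = messages[i].split()
--         if sender in sender_word_count:
--             sender_word_count[sender] += len(words)
--         else:
--             sender_word_count[sender] = len(words)
--
--     max_word_count = max(sender_word_count.values())
--     max_senders = [sender for sender, count in sender_word_count.items() if count == max_word_count]
--     return max(max_senders)
-- ===== SOURCE B (Python) =====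
-- from typing import List
--
-- def largestWordCount(messages: List[str], senders: List[str]) -> str:
--     counts = {}
--     best = None  # (count, sender)
--     for msg, sender in zip(messages, senders):
--         c = counts.get(sender, 0) + len(msg.split())
--         counts[sender] = c
--         if best is None or c > best[0] or (c == best[0] and sender > best[1]):
--             best = (c, sender)
--     return best[1]
-- ===== Notes on version B (the rewrite author's own statement) =====
-- stated objective: alternative
-- what changed: B fuses aggregation and argmax into one pass over zip(messages, senders), maintaining a running (count, sender) best with lexicographic tie-break, instead of building the whole dict and then scanning it three more times (max of values, filter of ties, max of names).
import Mathlib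
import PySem

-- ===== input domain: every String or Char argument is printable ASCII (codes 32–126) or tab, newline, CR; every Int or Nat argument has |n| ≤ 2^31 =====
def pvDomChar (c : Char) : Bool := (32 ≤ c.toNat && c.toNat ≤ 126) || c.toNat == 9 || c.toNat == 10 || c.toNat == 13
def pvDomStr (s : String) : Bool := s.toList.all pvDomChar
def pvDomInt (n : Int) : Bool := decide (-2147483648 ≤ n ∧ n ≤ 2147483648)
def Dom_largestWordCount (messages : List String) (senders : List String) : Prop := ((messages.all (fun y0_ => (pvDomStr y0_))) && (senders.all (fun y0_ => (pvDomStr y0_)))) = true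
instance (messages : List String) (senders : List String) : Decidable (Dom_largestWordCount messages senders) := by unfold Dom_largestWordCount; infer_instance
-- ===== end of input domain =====

-- B replaces A's build-dict-then-rescan (max of values, filter ties, max of names) by ONE fused pass
-- over zip(messages, senders) keeping a running (count, sender) best; return values agree on Pre_.

-- ===== PORT A =====
def largestWordCount (messages : List String) (senders : List String) : String :=
  let d := (PySem.List.pyRange 0 (PySem.List.len messages) 1).foldl
    (fun (d : PySem.Dict String Int) i =>
      let sender := PySem.List.pyGetD senders i ""      -- senders[i]; IndexError excluded by Pre_
      let words := PySem.Str.split₀ (PySem.List.pyGetD messages i "")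
      if d.contains sender then d.insert sender (d.getD sender 0 + (words.length : Int))
      else d.insert sender (words.length : Int)) PySem.Dict.empty
  match PySem.List.max? d.values (fun v => v) with
  | none => ""                                          -- max([]) raises ValueError; excluded by Pre_
  | some m =>
      (PySem.List.max? ((d.items.filter (fun p => p.2 == m)).map (fun p => p.1)) (fun s => s)).getD ""

-- ===== PORT B =====
def largestWordCount_alt (messages : List String) (senders : List String) : String :=
  let st := (messages.zip senders).foldl
    (fun (st : PySem.Dict String Int × Option (Int × String)) p =>
      let c := st.1.getD p.2 0 + ((PySem.Str.split₀ p.1).length : Int)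
      (st.1.insert p.2 c,
        match st.2 with
        | none => some (c, p.2)
        | some b => if c > b.1 ∨ (c = b.1 ∧ b.2 < p.2) then some (c, p.2) else some b))
    (PySem.Dict.empty, none)
  match st.2 with
  | none => ""                                          -- best is None: Python raises TypeError; excluded by Pre_
  | some b => b.2

-- ===== PRECONDITION & SPEC =====
-- A raises ValueError (max of an empty sequence) when messages is empty and IndexError when
-- senders is shorter than messages; Pre_ excludes exactly those inputs.
def Pre_largestWordCount (messages : List String) (senders : List String) : Prop :=
  messages ≠ [] ∧ messages.length ≤ senders.length
instance (messages : List String) (senders : List String) : Decidable (Pre_largestWordCount messages senders) := by unfold Pre_largestWordCount; infer_instance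
def pvWitness_largestWordCount : List String × List String := (["a b", "c", "d e f"], ["x", "y", "x"])

def Spec_largestWordCount (messages : List String) (senders : List String) (out : String) : Prop := out = largestWordCount_alt messages senders
instance (messages : List String) (senders : List String) (out : String) : Decidable (Spec_largestWordCount messages senders out) := by unfold Spec_largestWordCount; infer_instance

-- ===== CLAIM (what is proved, stated in full; the proofs are below) =====
def Claim_equal_largestWordCount : Prop := ∀ (messages : List String) (senders : List String), Dom_largestWordCount messages senders → Pre_largestWordCount messages senders → Spec_largestWordCount messages senders (largestWordCount messages senders)
-- ===== LEMMAS AND PROOFS =====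

-- A's loop body, on one (message, sender) pair
def pvStepA (d : PySem.Dict String Int) (p : String × String) : PySem.Dict String Int :=
  if d.contains p.2 then d.insert p.2 (d.getD p.2 0 + ((PySem.Str.split₀ p.1).length : Int))
  else d.insert p.2 ((PySem.Str.split₀ p.1).length : Int)

-- B's best-update: left-biased lexicographic max on (count, name)
def pvU (b : Option (Int × String)) (c : Int) (s : String) : Option (Int × String) :=
  match b with
  | none => some (c, s)
  | some b => if c > b.1 ∨ (c = b.1 ∧ b.2 < s) then some (c, s) else some b

-- running best over a dict's items
def pvF (b : Option (Int × String)) (L : List (String × Int)) : Option (Int × String) :=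
  L.foldl (fun b p => pvU b p.2 p.1) b

-- total form of pvU on a present accumulator
def pvG (b : Int × String) (p : String × Int) : Int × String :=
  if p.2 > b.1 ∨ (p.2 = b.1 ∧ b.2 < p.1) then (p.2, p.1) else b

theorem pvStepA_eq (d : PySem.Dict String Int) (p : String × String) :
    pvStepA d p = d.insert p.2 (d.getD p.2 0 + ((PySem.Str.split₀ p.1).length : Int)) := by
  unfold pvStepA
  split_ifs with h
  · rfl
  · rw [PySem.Dict.getD_of_not_contains d 0 (by simpa using h), zero_add]

theorem pvU_some (x : Int × String) (c : Int) (s : String) :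
    pvU (some x) c s = if c > x.1 ∨ (c = x.1 ∧ x.2 < s) then some (c, s) else some x := rfl

theorem pvU_swap_pair (c c' : Int) (s s' : String) :
    pvU (some (c, s)) c' s' = pvU (some (c', s')) c s := by
  simp only [pvU_some]
  by_cases h1 : c' > c ∨ (c' = c ∧ s < s') <;> by_cases h2 : c > c' ∨ (c = c' ∧ s' < s)
  · exfalso
    rcases h1 with h1 | ⟨h1, hs1⟩ <;> rcases h2 with h2 | ⟨h2, hs2⟩
    · omega
    · omega
    · omega
    · exact absurd (hs1.trans hs2) (lt_irrefl s)
  · rw [if_pos h1, if_neg h2]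
  · rw [if_neg h1, if_pos h2]
  · rw [if_neg h1, if_neg h2]
    obtain ⟨ha, hb⟩ := not_or.mp h1
    obtain ⟨hc2, hd⟩ := not_or.mp h2
    have hcc : c = c' := le_antisymm (not_lt.mp hc2) (not_lt.mp ha)
    have hss : s = s' := by
      have h3 : ¬ s < s' := fun hlt => hb ⟨hcc.symm, hlt⟩
      have h4 : ¬ s' < s := fun hlt => hd ⟨hcc, hlt⟩
      exact le_antisymm (not_lt.mp h4) (not_lt.mp h3)
    rw [hcc, hss]

theorem pvU_swap (b : Option (Int × String)) (c c' : Int) (s s' : String) :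
    pvU (pvU b c s) c' s' = pvU (pvU b c' s') c s := by
  rcases b with _ | ⟨bc, bs⟩
  · exact pvU_swap_pair c c' s s'
  · simp only [pvU_some]
    by_cases h1 : c > bc ∨ (c = bc ∧ bs < s) <;> by_cases h2 : c' > bc ∨ (c' = bc ∧ bs < s')
    · rw [if_pos h1, if_pos h2]
      exact pvU_swap_pair c c' s s'
    · rw [if_pos h1, if_neg h2]
      simp only [pvU_some]
      rw [if_neg, if_pos h1]
      obtain ⟨h2a, h2b⟩ := not_or.mp h2
      rintro (h3 | ⟨h3, h4⟩)
      · rcases h1 with h1 | ⟨h1, _⟩ <;> omega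
      · rcases h1 with h1 | ⟨h1, h5⟩
        · omega
        · refine absurd h4 (not_lt.mpr ?_)
          have hsb : ¬ bs < s' := fun hlt => h2b ⟨by omega, hlt⟩
          exact (not_lt.mp hsb).trans h5.le
    · rw [if_neg h1, if_pos h2]
      simp only [pvU_some]
      rw [if_pos h2, if_neg]
      obtain ⟨h1a, h1b⟩ := not_or.mp h1
      rintro (h3 | ⟨h3, h4⟩)
      · rcases h2 with h2 | ⟨h2, _⟩ <;> omega
      · rcases h2 with h2 | ⟨h2, h5⟩
        · omega
        · refine absurd h4 (not_lt.mpr ?_)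
          have hsb : ¬ bs < s := fun hlt => h1b ⟨by omega, hlt⟩
          exact (not_lt.mp hsb).trans h5.le
    · rw [if_neg h1, if_neg h2]
      simp only [pvU_some]
      rw [if_neg h2, if_neg h1]

theorem pvU_absorb (b : Option (Int × String)) (v c : Int) (s : String) (h : v ≤ c) :
    pvU (pvU b v s) c s = pvU b c s := by
  rcases b with _ | ⟨bc, bs⟩
  · show pvU (some (v, s)) c s = some (c, s)
    simp only [pvU_some]
    rcases eq_or_lt_of_le h with hvc | hvc
    · subst hvc
      rw [if_neg]
      rintro (h2 | ⟨_, h2⟩)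
      · omega
      · exact lt_irrefl _ h2
    · rw [if_pos (Or.inl hvc)]
  · simp only [pvU_some]
    by_cases h1 : v > bc ∨ (v = bc ∧ bs < s)
    · rw [if_pos h1]
      simp only [pvU_some]
      by_cases h2 : c > bc ∨ (c = bc ∧ bs < s)
      · rw [if_pos h2]
        rcases eq_or_lt_of_le h with hvc | hvc
        · subst hvc
          rw [if_neg]
          rintro (h3 | ⟨_, h3⟩)
          · omega
          · exact lt_irrefl _ h3
        · rw [if_pos (Or.inl hvc)]
      · exfalso
        obtain ⟨h2a, h2b⟩ := not_or.mp h2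
        rcases h1 with h1 | ⟨h1, h5⟩
        · omega
        · exact h2b ⟨by omega, h5⟩
    · rw [if_neg h1, pvU_some]

theorem pvF_swap (L : List (String × Int)) (b : Option (Int × String)) (c : Int) (s : String) :
    pvF (pvU b c s) L = pvU (pvF b L) c s := by
  induction L generalizing b with
  | nil => rfl
  | cons p t ih =>
    show pvF (pvU (pvU b c s) p.2 p.1) t = pvU (pvF (pvU b p.2 p.1) t) c s
    rw [pvU_swap, ih]

theorem pvF_append (b : Option (Int × String)) (l1 l2 : List (String × Int)) :
    pvF b (l1 ++ l2) = pvF (pvF b l1) l2 := by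
  unfold pvF; rw [List.foldl_append]

theorem pvF_insert (d : PySem.Dict String Int) (hnd : d.keys.Nodup) (c : Int) (s : String)
    (hc : d.getD s 0 ≤ c) :
    pvF none (d.insert s c).items = pvU (pvF none d.items) c s := by
  by_cases hcon : d.contains s
  · obtain ⟨p, hp, hps⟩ := List.mem_map.mp ((PySem.Dict.contains_iff_mem_keys d s).mp hcon)
    obtain ⟨s', v⟩ := p
    have hss : s = s' := hps.symm
    subst hss
    obtain ⟨pre, suf, hsplit⟩ := List.append_of_mem hp
    have hv : d.getD s 0 = v := PySem.Dict.getD_of_mem_items d hp hnd 0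
    have hkeys : (pre.map Prod.fst ++ s :: suf.map Prod.fst).Nodup := by
      have hh := hnd
      rw [show d.keys = d.items.map Prod.fst from rfl, hsplit] at hh
      simpa using hh
    have hpre : s ∉ pre.map Prod.fst := by
      intro hmem
      rcases List.nodup_append.mp hkeys with ⟨-, -, hdisj⟩
      exact hdisj _ hmem _ (by simp) rfl
    have hsuf : s ∉ suf.map Prod.fst := by
      rcases List.nodup_append.mp hkeys with ⟨-, hnd2, -⟩
      simpa using (List.nodup_cons.mp hnd2).1
    have hmap : (d.insert s c).items = pre ++ (s, c) :: suf := by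
      rw [PySem.Dict.items_insert_of_contains d c hcon, hsplit]
      rw [List.map_append, List.map_cons]
      congr 1
      · apply (List.map_congr_left _).trans (List.map_id _)
        intro x hx
        have hxs : x.1 ≠ s := fun hh => hpre (List.mem_map.mpr ⟨x, hx, hh⟩)
        simp [hxs]
      · congr 1
        · simp
        · apply (List.map_congr_left _).trans (List.map_id _)
          intro x hx
          have hxs : x.1 ≠ s := fun hh => hsuf (List.mem_map.mpr ⟨x, hx, hh⟩)
          simp [hxs]
    rw [hmap, hsplit, pvF_append, pvF_append]
    show pvF (pvU (pvF none pre) c s) suf = pvU (pvF (pvU (pvF none pre) v s) suf) c s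
    rw [pvF_swap, pvF_swap, pvU_absorb _ _ _ _ (hv ▸ hc)]
  · rw [PySem.Dict.items_insert_of_not_contains d c (by simpa using hcon), pvF_append]
    rfl

-- B's loop body, with the lets flattened
def pvStepB (st : PySem.Dict String Int × Option (Int × String)) (p : String × String) :
    PySem.Dict String Int × Option (Int × String) :=
  (st.1.insert p.2 (st.1.getD p.2 0 + ((PySem.Str.split₀ p.1).length : Int)),
   pvU st.2 (st.1.getD p.2 0 + ((PySem.Str.split₀ p.1).length : Int)) p.2)

theorem pvBody_eq :
    (fun (st : PySem.Dict String Int × Option (Int × String)) (p : String × String) =>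
      let c := st.1.getD p.2 0 + ((PySem.Str.split₀ p.1).length : Int)
      (st.1.insert p.2 c,
        match st.2 with
        | none => some (c, p.2)
        | some b => if c > b.1 ∨ (c = b.1 ∧ b.2 < p.2) then some (c, p.2) else some b))
    = pvStepB := by
  funext st p
  rcases st with ⟨d, b⟩
  cases b <;> rfl

-- the loop invariant: B's fold carries A's dict together with the running best of its items
theorem pvLoop (L : List (String × String)) (d : PySem.Dict String Int) (b : Option (Int × String))
    (hnd : d.keys.Nodup) (hb : b = pvF none d.items) :
    L.foldl pvStepB (d, b)
      = (L.foldl pvStepA d, pvF none (L.foldl pvStepA d).items)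
    ∧ (L.foldl pvStepA d).keys.Nodup := by
  induction L generalizing d b with
  | nil => subst hb; exact ⟨rfl, hnd⟩
  | cons p t ih =>
    have hwc : (0:Int) ≤ ((PySem.Str.split₀ p.1).length : Int) := by positivity
    have hc : d.getD p.2 0 ≤ d.getD p.2 0 + ((PySem.Str.split₀ p.1).length : Int) := by omega
    have hb' : pvU b (d.getD p.2 0 + ((PySem.Str.split₀ p.1).length : Int)) p.2
        = pvF none (pvStepA d p).items := by
      rw [hb, pvStepA_eq, pvF_insert d hnd _ _ hc]
    have hnd' : (pvStepA d p).keys.Nodup := by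
      rw [pvStepA_eq]
      exact PySem.Dict.nodup_keys_insert _ _ _ hnd
    have step := ih (pvStepA d p) _ hnd' hb'
    refine ⟨?_, step.2⟩
    have hfirst : pvStepB (d, b) p
        = (pvStepA d p, pvU b (d.getD p.2 0 + ((PySem.Str.split₀ p.1).length : Int)) p.2) := by
      unfold pvStepB
      rw [← pvStepA_eq]
    calc (p :: t).foldl pvStepB (d, b)
        = t.foldl pvStepB (pvStepB (d, b) p) := rfl
      _ = t.foldl pvStepB (pvStepA d p, pvU b (d.getD p.2 0 + ((PySem.Str.split₀ p.1).length : Int)) p.2) := by rw [hfirst]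
      _ = ((p :: t).foldl pvStepA d, pvF none ((p :: t).foldl pvStepA d).items) := step.1

theorem pvF_some (t : List (String × Int)) (b : Int × String) :
    pvF (some b) t = some (t.foldl pvG b) := by
  induction t generalizing b with
  | nil => rfl
  | cons p t ih =>
    show pvF (pvU (some b) p.2 p.1) t = some (t.foldl pvG (pvG b p))
    rw [pvU_some, ← ih]
    congr 1
    unfold pvG
    split_ifs <;> rfl

theorem pvG_fst (t : List (String × Int)) (b : Int × String) :
    (t.foldl pvG b).1 = t.foldl (fun a p => max a p.2) b.1 := by
  induction t generalizing b with
  | nil => rfl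
  | cons p t ih =>
    show (t.foldl pvG (pvG b p)).1 = t.foldl (fun a p => max a p.2) (max b.1 p.2)
    rw [ih]
    congr 1
    unfold pvG
    split_ifs with h
    · rcases h with h | ⟨h, -⟩
      · exact (max_eq_right h.le).symm
      · simp [h]
    · obtain ⟨ha, -⟩ := not_or.mp h
      exact (max_eq_left (not_lt.mp ha)).symm

theorem pvG_bounds (t : List (String × Int)) (b : Int × String) :
    b.1 ≤ (t.foldl pvG b).1 ∧ ∀ p ∈ t, p.2 ≤ (t.foldl pvG b).1 := by
  rw [pvG_fst]
  exact PySem.List.le_foldl_max_int t (fun p => p.2) b.1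

-- the second component of the running best is the max name among entries achieving the max count
theorem pvExtract (t : List (String × Int)) (b : Int × String) (M : Int)
    (h : (t.foldl pvG b).1 = M) :
    PySem.List.max? ((if b.1 = M then [b.2] else []) ++ (t.filter (fun p => p.2 == M)).map (fun p => p.1)) (fun s => s)
      = some (t.foldl pvG b).2 := by
  induction t generalizing b with
  | nil =>
    simp only [List.foldl_nil] at h ⊢
    rw [if_pos h]
    simp [PySem.List.max?_id_cons]
  | cons p t ih =>
    have hM : (t.foldl pvG (pvG b p)).1 = M := h
    have hbounds := pvG_bounds t (pvG b p)
    have hgb : b.1 ≤ (pvG b p).1 ∧ p.2 ≤ (pvG b p).1 := by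
      unfold pvG
      split_ifs with hcnd
      · rcases hcnd with hcnd | ⟨hcnd, -⟩
        · exact ⟨hcnd.le, le_refl _⟩
        · exact ⟨hcnd.ge, le_refl _⟩
      · obtain ⟨ha, -⟩ := not_or.mp hcnd
        exact ⟨le_refl _, not_lt.mp ha⟩
    have hb1 : b.1 ≤ M := hM ▸ (hgb.1.trans hbounds.1)
    have hp2 : p.2 ≤ M := hM ▸ (hgb.2.trans hbounds.1)
    show PySem.List.max? ((if b.1 = M then [b.2] else []) ++ ((p :: t).filter (fun p => p.2 == M)).map (fun p => p.1)) (fun s => s)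
      = some ((t.foldl pvG (pvG b p)).2)
    by_cases hpM : p.2 = M
    · rw [List.filter_cons_of_pos (by simpa using hpM)]
      by_cases hbM : b.1 = M
      · -- both at M: pvG keeps the larger name
        have hgbp : pvG b p = (M, if b.2 < p.1 then p.1 else b.2) := by
          unfold pvG
          by_cases hs : b.2 < p.1
          · rw [if_pos (Or.inr ⟨by omega, hs⟩), if_pos hs, hpM]
          · rw [if_neg, if_neg hs]
            · exact Prod.ext (by simp [hbM]) rfl
            · rintro (h3 | ⟨-, h3⟩)
              · omega
              · exact hs h3
        have hthis := ih (pvG b p) hM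
        rw [hgbp] at hthis
        rw [if_pos rfl] at hthis
        rw [if_pos hbM, hgbp, ← hthis]
        simp only [List.map_cons, List.singleton_append]
        rw [PySem.List.max?_id_cons, PySem.List.max?_id_cons, List.foldl_cons]
        have hmx : max b.2 p.1 = (if b.2 < p.1 then p.1 else b.2) := by
          by_cases hs : b.2 < p.1
          · rw [if_pos hs, max_eq_right hs.le]
          · rw [if_neg hs, max_eq_left (not_lt.mp hs)]
        rw [hmx]
      · -- only p at M: pvG switches to p
        have hgbp : pvG b p = (M, p.1) := by
          unfold pvG
          rw [if_pos (Or.inl (by omega)), hpM]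
        have hthis := ih (pvG b p) hM
        rw [hgbp] at hthis
        rw [if_pos rfl] at hthis
        rw [if_neg hbM, hgbp, ← hthis]
        simp only [List.map_cons, List.singleton_append, List.nil_append]
    · rw [List.filter_cons_of_neg (by simpa using hpM)]
      by_cases hbM : b.1 = M
      · -- p below M: pvG keeps b
        have hgbp : pvG b p = b := by
          unfold pvG
          rw [if_neg]
          rintro (h3 | ⟨h3, -⟩) <;> omega
        have hthis := ih (pvG b p) hM
        rw [hgbp] at hthis ⊢
        exact hthis
      · -- neither at M
        have h1 : (pvG b p).1 ≠ M := by
          unfold pvG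
          split_ifs
          · exact hpM
          · exact hbM
        have hthis := ih (pvG b p) hM
        rw [if_neg h1] at hthis
        rw [if_neg hbM]
        exact hthis

theorem pvStepA_items_ne_nil (d : PySem.Dict String Int) (p : String × String) :
    (pvStepA d p).items ≠ [] := by
  rw [pvStepA_eq]
  by_cases hcon : d.contains p.2
  · rw [PySem.Dict.items_insert_of_contains d _ hcon]
    intro hnil
    have hdn : d.items = [] := by simpa using congrArg List.length hnil
    have hk := (PySem.Dict.contains_iff_mem_keys d p.2).mp hcon
    rw [show d.keys = d.items.map Prod.fst from rfl, hdn] at hk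
    simp at hk
  · rw [PySem.Dict.items_insert_of_not_contains d _ (by simpa using hcon)]
    simp

theorem pvFold_items_ne_nil (L : List (String × String)) (d : PySem.Dict String Int)
    (h : d.items ≠ []) : (L.foldl pvStepA d).items ≠ [] := by
  induction L generalizing d with
  | nil => exact h
  | cons p t ih => exact ih _ (pvStepA_items_ne_nil d p)

-- A's index loop over range(len(messages)) is the fold of pvStepA over zip(messages, senders)
theorem pvRange_fold_eq_zip (messages senders : List String)
    (h : messages.length ≤ senders.length) :
    (PySem.List.pyRange 0 (PySem.List.len messages) 1).foldl
      (fun (d : PySem.Dict String Int) i =>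
        let sender := PySem.List.pyGetD senders i ""
        let words := PySem.Str.split₀ (PySem.List.pyGetD messages i "")
        if d.contains sender then d.insert sender (d.getD sender 0 + (words.length : Int))
        else d.insert sender (words.length : Int)) PySem.Dict.empty
    = (messages.zip senders).foldl pvStepA PySem.Dict.empty := by
  have hz : (messages.zip senders).length = messages.length := by
    rw [List.length_zip]; omega
  have hlen : PySem.List.len messages = PySem.List.len (messages.zip senders) := by
    simp [PySem.List.len_eq, hz]
  rw [hlen]
  rw [PySem.List.foldl_congr_mem _ _
      (fun (d : PySem.Dict String Int) i => pvStepA d (PySem.List.pyGetD (messages.zip senders) i ("", ""))) _ ?hcong]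
  · exact PySem.List.foldl_pyRange_zero_pyGetD (messages.zip senders) ("", "") pvStepA PySem.Dict.empty
  case hcong =>
    intro acc i hi
    have hir : 0 ≤ i ∧ i < ((messages.zip senders).length : Int) := by
      have hm := PySem.List.mem_pyRange_one.mp hi
      simpa [PySem.List.len_eq] using hm
    have h1 : i < (messages.length : Int) := by omega
    have h2 : i < (senders.length : Int) := by omega
    have e1 : PySem.List.pyGetD senders i "" = senders[i.toNat] :=
      PySem.List.pyGetD_eq_getElem _ _ hir.1 (by exact_mod_cast h2)
    have e2 : PySem.List.pyGetD messages i "" = messages[i.toNat] :=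
      PySem.List.pyGetD_eq_getElem _ _ hir.1 (by exact_mod_cast h1)
    have e3 : PySem.List.pyGetD (messages.zip senders) i ("", "") = (messages[i.toNat]'(by omega), senders[i.toNat]'(by omega)) := by
      rw [PySem.List.pyGetD_eq_getElem _ _ hir.1 hir.2, List.getElem_zip]
    simp only [e1, e2, e3, pvStepA]

theorem pvAlt_eq (messages senders : List String) :
    largestWordCount_alt messages senders =
      match pvF none (((messages.zip senders).foldl pvStepA PySem.Dict.empty).items) with
      | none => ""
      | some b => b.2 := by
  unfold largestWordCount_alt
  rw [pvBody_eq]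
  rw [(pvLoop (messages.zip senders) PySem.Dict.empty none PySem.Dict.nodup_keys_empty rfl).1]

theorem pvA_eq (messages senders : List String) (hlen : messages.length ≤ senders.length) :
    largestWordCount messages senders =
      (match PySem.List.max? ((messages.zip senders).foldl pvStepA PySem.Dict.empty).values (fun v => v) with
      | none => ""
      | some m =>
          (PySem.List.max? (((((messages.zip senders).foldl pvStepA PySem.Dict.empty)).items.filter
            (fun p => p.2 == m)).map (fun p => p.1)) (fun s => s)).getD "") := by
  unfold largestWordCount
  rw [pvRange_fold_eq_zip messages senders hlen]

-- ===== VERDICT (by name: the statement is the Claim_ definition above) =====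
theorem largestWordCount_spec : Claim_equal_largestWordCount := by
  intro messages senders _ hpre
  obtain ⟨hne, hlen⟩ := hpre
  unfold Spec_largestWordCount
  rw [pvA_eq messages senders hlen, pvAlt_eq messages senders]
  have hzs : (messages.zip senders) ≠ [] := by
    have h0 : 0 < messages.length := List.length_pos_iff.mpr hne
    intro hnil
    have h1 := congrArg List.length hnil
    rw [List.length_zip] at h1
    simp only [List.length_nil] at h1
    omega
  obtain ⟨z, zt, hzsplit⟩ := List.exists_cons_of_ne_nil hzs
  have hitems : (((messages.zip senders)).foldl pvStepA PySem.Dict.empty).items ≠ [] := by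
    rw [hzsplit]
    exact pvFold_items_ne_nil zt _ (pvStepA_items_ne_nil _ _)
  obtain ⟨e, tl, hsplit⟩ := List.exists_cons_of_ne_nil hitems
  rw [hsplit]
  have hB : pvF none (e :: tl) = some (tl.foldl pvG (e.2, e.1)) := by
    show pvF (pvU none e.2 e.1) tl = _
    rw [show pvU none e.2 e.1 = some (e.2, e.1) from rfl, pvF_some]
  have hvals : ((messages.zip senders).foldl pvStepA PySem.Dict.empty).values = e.2 :: tl.map (fun p => p.2) := by
    show (((messages.zip senders).foldl pvStepA PySem.Dict.empty).items).map (fun p => p.2) = _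
    rw [hsplit, List.map_cons]
  have hmaxv : PySem.List.max? (((messages.zip senders).foldl pvStepA PySem.Dict.empty).values) (fun v => v)
      = some (tl.foldl pvG (e.2, e.1)).1 := by
    rw [hvals, PySem.List.max?_id_cons]
    congr 1
    rw [pvG_fst, List.foldl_map]
  rw [hmaxv, hB]
  have hext := pvExtract tl (e.2, e.1) (tl.foldl pvG (e.2, e.1)).1 rfl
  have hlist : ((if (e.2, e.1).1 = (tl.foldl pvG (e.2, e.1)).1 then [(e.2, e.1).2] else []) ++ (tl.filter (fun p => p.2 == (tl.foldl pvG (e.2, e.1)).1)).map (fun p => p.1))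
      = ((e :: tl).filter (fun p => p.2 == (tl.foldl pvG (e.2, e.1)).1)).map (fun p => p.1) := by
    by_cases heM : e.2 = (tl.foldl pvG (e.2, e.1)).1
    · rw [if_pos heM, List.filter_cons_of_pos (by simpa using heM), List.map_cons]
      rfl
    · rw [if_neg heM, List.filter_cons_of_neg (by simpa using heM)]
      rfl
  rw [hlist] at hext
  show (PySem.List.max? (((e :: tl).filter (fun p => p.2 == (tl.foldl pvG (e.2, e.1)).1)).map (fun p => p.1)) (fun s => s)).getD ""
      = (tl.foldl pvG (e.2, e.1)).2
  rw [hext, Option.getD_some]
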